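-- pv_equiv track=rewrite | github.com/miliar/Code_Jam_Webscraper | Solutions_python/Problem_155/3622.py | getCountOfAdditionalPeople
-- ===== SOURCE A (Python) =====
-- def getCountOfAdditionalPeople(rawString):
-- 	stayingPeople = 0
-- 	additionalPeople = 0
-- 	for i, c in enumerate(rawString[2:int(rawString[:1]) + 3]):
-- 		if (stayingPeople < i and int(c) > 0):
-- 			additionalPeople += i - stayingPeople
-- 			stayingPeople = i
-- 		stayingPeople += int(c)
-- 	return additionalPeople
-- ===== SOURCE B (Python) =====
-- def getCountOfAdditionalPeople(rawString):
--     segment = rawString[2:int(rawString[:1]) + 3]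
--     vals = [int(c) for c in segment]
--     prefixes = []
--     total = 0
--     for v in vals:
--         prefixes.append(total)
--         total += v
--     deficits = [i - p for i, (v, p) in enumerate(zip(vals, prefixes)) if v > 0]
--     return max([0] + deficits)
-- ===== Notes on version B (the rewrite author's own statement) =====
-- stated objective: alternative
-- what changed: B is a staged computation: it materialises the digit list, builds the exclusive prefix-sum list, collects the deficit i - prefix[i] for every positive level, and returns the maximum of those with 0, instead of A's one-pass greedy top-up that carries the added people inside its running total.
import Mathlib
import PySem

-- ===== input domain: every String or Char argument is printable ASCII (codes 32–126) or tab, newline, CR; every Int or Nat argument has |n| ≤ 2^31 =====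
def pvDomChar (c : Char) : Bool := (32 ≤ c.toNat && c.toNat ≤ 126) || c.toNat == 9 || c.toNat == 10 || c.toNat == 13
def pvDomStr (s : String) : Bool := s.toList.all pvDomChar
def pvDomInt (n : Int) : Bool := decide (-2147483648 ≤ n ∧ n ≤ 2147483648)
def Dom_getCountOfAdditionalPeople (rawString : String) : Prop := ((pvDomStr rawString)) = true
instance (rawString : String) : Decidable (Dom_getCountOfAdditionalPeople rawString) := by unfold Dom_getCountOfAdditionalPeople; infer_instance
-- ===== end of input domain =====

-- B replaces A's one-pass greedy top-up-and-carry with a staged computation (digit list, exclusive prefix sums, max shortfall); return value only, no speed claim.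


-- ===== PORT A =====
-- the for-loop over enumerate(...) with A's two accumulators; int(c) is evaluated each iteration
-- (Pre_ guarantees every ofChars? below is some, so the .getD 0 defaults are never taken inside Pre_)
def pvALoop : List (Int × Char) → Int → Int → Int
  | [], _stayingPeople, additionalPeople => additionalPeople
  | (i, c) :: rest, stayingPeople, additionalPeople =>
    let cv := (PySem.Int.ofChars? [c]).getD 0
    if stayingPeople < i ∧ cv > 0 then
      pvALoop rest (i + cv) (additionalPeople + (i - stayingPeople))
    else
      pvALoop rest (stayingPeople + cv) additionalPeople

def getCountOfAdditionalPeople (rawString : String) : Int :=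
  let cs := rawString.toList
  let d := (PySem.Int.ofChars? (PySem.List.slice cs none (some 1))).getD 0
  pvALoop (PySem.List.enumerate (PySem.List.slice cs (some 2) (some (d + 3))) 0) 0 0

-- ===== PORT B =====
-- the `for v in vals` loop building the exclusive prefix-sum list (append to prefixes, then total += v)
def pvPrefixes : List Int → Int → List Int
  | [], _total => []
  | v :: rest, total => total :: pvPrefixes rest (total + v)

def getCountOfAdditionalPeople_alt (rawString : String) : Int :=
  let cs := rawString.toList
  let segment := PySem.List.slice cs (some 2)
    (some ((PySem.Int.ofChars? (PySem.List.slice cs none (some 1))).getD 0 + 3))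
  let vals := segment.map (fun c => (PySem.Int.ofChars? [c]).getD 0)
  let prefixes := pvPrefixes vals 0
  let deficits := ((PySem.List.enumerate (vals.zip prefixes) 0).filter
      (fun x => x.2.1 > 0)).map (fun x => x.1 - x.2.2)
  (PySem.List.max? ((0 : Int) :: deficits) (fun x => x)).getD 0

-- ===== PRECONDITION & SPEC =====
-- Pre_ excludes exactly the inputs on which A raises ValueError: int(rawString[:1]) must parse
-- (nonempty, first char an int literal) and every character of the inspected slice must parse as int
def Pre_getCountOfAdditionalPeople (rawString : String) : Prop :=
  ((PySem.Int.ofChars? (PySem.List.slice rawString.toList none (some 1))).isSome &&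
   (PySem.List.slice rawString.toList (some 2)
      (some ((PySem.Int.ofChars? (PySem.List.slice rawString.toList none (some 1))).getD 0 + 3))).all
     (fun c => (PySem.Int.ofChars? [c]).isSome)) = true
instance (rawString : String) : Decidable (Pre_getCountOfAdditionalPeople rawString) := by
  unfold Pre_getCountOfAdditionalPeople; infer_instance

def pvWitness_getCountOfAdditionalPeople : String := "4 10911"

def Spec_getCountOfAdditionalPeople (rawString : String) (out : Int) : Prop := out = getCountOfAdditionalPeople_alt rawString
instance (rawString : String) (out : Int) : Decidable (Spec_getCountOfAdditionalPeople rawString out) := by unfold Spec_getCountOfAdditionalPeople; infer_instance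

-- ===== CLAIM (what is proved, stated in full; the proofs are below) =====
def Claim_equal_getCountOfAdditionalPeople : Prop := ∀ (rawString : String), Dom_getCountOfAdditionalPeople rawString → Pre_getCountOfAdditionalPeople rawString → Spec_getCountOfAdditionalPeople rawString (getCountOfAdditionalPeople rawString)

-- ===== LEMMAS AND PROOFS =====
-- Proof-only single-pass max-shortfall loop, the bridge between the two ports.
def pvMaxLoop : List (Int × Char) → Int → Int → Int
  | [], _people, best => best
  | (i, c) :: rest, people, best =>
    let v := (PySem.Int.ofChars? [c]).getD 0
    pvMaxLoop rest (people + v) (if v > 0 then max best (i - people) else best)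

-- A's accumulators decompose as (true prefix + running max, running max).
theorem pvALoop_eq_maxLoop (l : List (Int × Char)) : ∀ (p best : Int),
    pvALoop l (p + best) best = pvMaxLoop l p best := by
  induction l with
  | nil => intro p best; rfl
  | cons hd tl ih =>
    intro p best
    obtain ⟨i, c⟩ := hd
    simp only [pvALoop, pvMaxLoop]
    set cv := (PySem.Int.ofChars? [c]).getD 0 with hcv
    by_cases hpos : cv > 0
    · by_cases hlt : p + best < i
      · rw [if_pos ⟨hlt, hpos⟩, if_pos hpos, max_eq_right (by omega),
          show best + (i - (p + best)) = i - p by ring]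
        have := ih (p + cv) (i - p)
        rw [show p + cv + (i - p) = i + cv by ring] at this
        exact this
      · rw [if_neg (by omega), if_pos hpos, max_eq_left (by omega)]
        have := ih (p + cv) best
        rw [show p + cv + best = p + best + cv by ring] at this
        exact this
    · rw [if_neg (by omega), if_neg hpos]
      have := ih (p + cv) best
      rw [show p + cv + best = p + best + cv by ring] at this
      exact this

-- The deficit list B builds from a char segment, with start index k and initial prefix p.
def pvDeficits (cs : List Char) (k p : Int) : List Int :=
  let vals := cs.map (fun c => (PySem.Int.ofChars? [c]).getD 0)
  ((PySem.List.enumerate (vals.zip (pvPrefixes vals p)) k).filter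
      (fun x => x.2.1 > 0)).map (fun x => x.1 - x.2.2)

-- The single-pass max loop computes the fold of max over B's staged deficit list.
theorem pvMaxLoop_eq_foldl (cs : List Char) : ∀ (k p best : Int),
    pvMaxLoop (PySem.List.enumerate cs k) p best = (pvDeficits cs k p).foldl max best := by
  induction cs with
  | nil => intro k p best; rfl
  | cons c rest ih =>
    intro k p best
    rw [PySem.List.enumerate_cons]
    simp only [pvMaxLoop, pvDeficits, List.map_cons, pvPrefixes, List.zip_cons_cons,
      PySem.List.enumerate_cons, List.filter_cons]
    set v := (PySem.Int.ofChars? [c]).getD 0 with hv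
    by_cases hpos : v > 0
    · rw [if_pos hpos, if_pos (by simpa using hpos)]
      simpa [pvDeficits] using ih (k + 1) (p + v) (max best (k - p))
    · rw [if_neg hpos, if_neg (by simpa using hpos)]
      simpa [pvDeficits] using ih (k + 1) (p + v) best

-- Bridge: A's loop over the enumerated segment equals B's staged max-of-deficits.
theorem pvBridge (cs : List Char) :
    pvALoop (PySem.List.enumerate cs) 0 0
      = (PySem.List.max? ((0 : Int) :: pvDeficits cs 0 0) (fun x => x)).getD 0 := by
  rw [PySem.List.max?_id_cons, Option.getD_some, ← pvMaxLoop_eq_foldl]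
  simpa using pvALoop_eq_maxLoop (PySem.List.enumerate cs) 0 0

-- ===== VERDICT (by name: the statement is the Claim_ definition above) =====
theorem getCountOfAdditionalPeople_spec : Claim_equal_getCountOfAdditionalPeople := by
  intro rawString _ _
  unfold Spec_getCountOfAdditionalPeople getCountOfAdditionalPeople getCountOfAdditionalPeople_alt
  exact pvBridge _
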